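-- pv_equiv track=rewrite | github.com/Azcobu/Advent-of-Code-2021 | 2016/day07/aoc2016-7b.py | verify_ip
-- ===== SOURCE A (Python) =====
-- def find_abas(instr):
--     aba_list = []
--     for pos, letter in enumerate(instr[:-2]):
--         if instr[pos] == instr[pos+2] and instr[pos] != instr[pos+1]:
--             aba_list.append(instr[pos:pos+3])
--     return aba_list or False
--
-- def verify_ip(instr):
--     aba_list = []
--     found = False
--     instr = instr.replace('[', ']').split(']')
--     outs, ins = instr[::2], instr[1::2]
--
--     for x in outs:
--         if res := find_abas(x):
--             aba_list += res
--
--     for a in aba_list: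
--         bab = a[1] + a[0] + a[1]
--         if any([bab in x for x in ins]):
--             found = True
--
--     return found
-- ===== SOURCE B (Python) =====
-- def verify_ip(instr):
--     # One pass per segment collecting (a, b) pairs into sets, then a set-membership
--     # check replaces A's per-ABA substring search over all hypernet segments.
--     parts = instr.replace('[', ']').split(']')
--     supers = set()
--     hypers = set()
--     for idx, seg in enumerate(parts):
--         target = supers if idx % 2 == 0 else hypers
--         for a, b, c in zip(seg, seg[1:], seg[2:]):
--             if a == c and a != b:
--                 target.add((a, b))
--     return any((b, a) in supers for (a, b) in hypers)
-- ===== Notes on version B (the rewrite author's own statement) =====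
-- stated objective: faster
-- what changed: One pass over the segments collects (a,b) ABA pairs into two sets (supernet/hypernet by segment parity); a set-membership check of the reversed pair replaces A's per-ABA substring search over every hypernet segment.
import Mathlib
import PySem

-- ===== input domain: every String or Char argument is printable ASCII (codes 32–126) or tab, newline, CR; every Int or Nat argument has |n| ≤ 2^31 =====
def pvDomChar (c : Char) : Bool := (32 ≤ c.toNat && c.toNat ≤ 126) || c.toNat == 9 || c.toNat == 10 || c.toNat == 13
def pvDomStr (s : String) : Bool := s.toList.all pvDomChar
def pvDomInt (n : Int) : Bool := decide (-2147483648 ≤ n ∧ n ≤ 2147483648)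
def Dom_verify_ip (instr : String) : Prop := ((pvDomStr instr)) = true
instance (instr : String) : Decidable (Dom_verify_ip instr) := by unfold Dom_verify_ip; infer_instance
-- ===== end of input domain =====

-- B replaces A's per-ABA substring search over all hypernet segments by one pass that
-- collects (a,b) pairs into two sets and a reversed-pair set-membership test (objective: faster).

-- ===== PORT A =====
-- find_abas: scan positions of instr[:-2], collect instr[pos:pos+3] where instr[pos]==instr[pos+2]!=instr[pos+1].
-- (Python returns `aba_list or False`; callers only test truthiness, kept as a nonemptiness test at the call site.)
def findAbas (x : List Char) : List (List Char) :=
  (PySem.List.enumerate (PySem.List.slice x none (some (-2)))).foldl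
    (fun acc p =>
      if (PySem.List.pyGetD x p.1 ' ' == PySem.List.pyGetD x (p.1 + 2) ' ') &&
         !(PySem.List.pyGetD x p.1 ' ' == PySem.List.pyGetD x (p.1 + 1) ' ')
      then acc ++ [PySem.List.slice x (some p.1) (some (p.1 + 3))] else acc) []

-- the body of A's verify_ip after `instr = instr.replace('[', ']').split(']')` (segments as char lists)
def verifyACore (parts : List (List Char)) : Bool :=
  let outs := (PySem.List.slice? parts none none 2).getD []       -- instr[::2]
  let ins := (PySem.List.slice? parts (some 1) none 2).getD []    -- instr[1::2]
  let abaList := outs.foldl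
    (fun acc x => let res := findAbas x; if res ≠ [] then acc ++ res else acc) []
  abaList.foldl
    (fun found a =>
      let bab := [PySem.List.pyGetD a 1 ' ', PySem.List.pyGetD a 0 ' ', PySem.List.pyGetD a 1 ' ']
      if (ins.map (fun x => PySem.Chars.isIn bab x)).any id then true else found) false

def verify_ip (instr : String) : Bool :=
  verifyACore (((PySem.Str.split? (PySem.Str.replace instr "[" "]") "]").getD []).map String.toList)

-- ===== PORT B =====
-- for a,b,c in zip(seg, seg[1:], seg[2:]): if a == c and a != b: target.add((a, b))
def addPairs (t : PySem.Set (Char × Char)) (seg : List Char) : PySem.Set (Char × Char) :=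
  ((seg.zip (PySem.List.slice seg (some 1) none)).zip (PySem.List.slice seg (some 2) none)).foldl
    (fun t tr => if tr.1.1 == tr.2 && !(tr.1.1 == tr.1.2) then t.add (tr.1.1, tr.1.2) else t) t

-- the body of B's verify_ip after the same split (segments as char lists)
def verifyBCore (parts : List (List Char)) : Bool :=
  let st := (PySem.List.enumerate parts).foldl
    (fun (st : PySem.Set (Char × Char) × PySem.Set (Char × Char)) p =>
      if PySem.Int.mod p.1 2 == 0 then (addPairs st.1 p.2, st.2) else (st.1, addPairs st.2 p.2))
    (PySem.Set.empty, PySem.Set.empty)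
  st.2.any (fun q => st.1.contains (q.2, q.1))

def verify_ip_alt (instr : String) : Bool :=
  verifyBCore (((PySem.Str.split? (PySem.Str.replace instr "[" "]") "]").getD []).map String.toList)

-- ===== PRECONDITION & SPEC =====
def Spec_verify_ip (instr : String) (out : Bool) : Prop := out = verify_ip_alt instr
instance (instr : String) (out : Bool) : Decidable (Spec_verify_ip instr out) := by unfold Spec_verify_ip; infer_instance

-- ===== CLAIM (what is proved, stated in full; the proofs are below) =====
def Claim_equal_verify_ip : Prop := ∀ (instr : String), Dom_verify_ip instr → Spec_verify_ip instr (verify_ip instr)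

-- ===== LEMMAS AND PROOFS =====

-- [a,b,a] occurs in x at index j
def HitIdx (a b : Char) (x : List Char) : Prop :=
  ∃ j : Nat, x[j]? = some a ∧ x[j+1]? = some b ∧ x[j+2]? = some a

-- common characterization: an ABA pair in an even segment whose BAB sits in an odd segment
def SslProp (parts : List (List Char)) : Prop :=
  ∃ a b : Char, a ≠ b ∧
    (∃ k, ∃ _ : k < parts.length, k % 2 = 0 ∧ HitIdx a b parts[k]) ∧
    (∃ k, ∃ _ : k < parts.length, k % 2 = 1 ∧ HitIdx b a parts[k])

theorem infix_triple (a b : Char) (x : List Char) :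
    [a, b, a] <:+: x ↔ HitIdx a b x := by
  constructor
  · rintro ⟨s, t, rfl⟩
    exact ⟨s.length, by simp⟩
  · rintro ⟨j, h1, h2, h3⟩
    obtain ⟨hj1, e1⟩ := List.getElem?_eq_some_iff.mp h1
    obtain ⟨hj2, e2⟩ := List.getElem?_eq_some_iff.mp h2
    obtain ⟨hj3, e3⟩ := List.getElem?_eq_some_iff.mp h3
    refine ⟨x.take j, x.drop (j+3), ?_⟩
    have hdrop : x.drop j = a :: b :: a :: x.drop (j+3) := by
      rw [List.drop_eq_getElem_cons hj1, List.drop_eq_getElem_cons hj2,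
          List.drop_eq_getElem_cons hj3, e1, e2, e3]
    calc x.take j ++ [a, b, a] ++ x.drop (j+3)
        = x.take j ++ x.drop j := by rw [hdrop]; simp
      _ = x := List.take_append_drop j x

theorem drop_triple (x : List Char) (k : Nat) (h : k + 2 < x.length) :
    x.drop k = x[k] :: x[k+1] :: x[k+2] :: x.drop (k+3) := by
  rw [List.drop_eq_getElem_cons (by omega), List.drop_eq_getElem_cons (by omega),
      List.drop_eq_getElem_cons (by omega)]

theorem mem_findAbas (x : List Char) (l : List Char) :
    l ∈ findAbas x ↔ ∃ a b : Char, a ≠ b ∧ HitIdx a b x ∧ l = [a, b, a] := by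
  unfold findAbas
  rw [PySem.List.foldl_append_if]
  rw [PySem.List.slice_to_neg_ofNat x 2 (by omega)]
  simp only [List.nil_append, List.mem_map, List.mem_filter, PySem.List.mem_enumerate_iff]
  constructor
  · rintro ⟨p, ⟨⟨k, hk, rfl⟩, hcond⟩, rfl⟩
    have hk3 : k + 2 < x.length := by
      simp [List.length_take] at hk; omega
    have hc0 : ((0:Int) + (k:Int)) = ((k : Nat) : Int) := by ring
    simp only [hc0, PySem.List.pyGetD_natCast] at hcond
    have e1 : ((k:Int) + 2) = (((k+2 : Nat)) : Int) := by push_cast; ring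
    have e2 : ((k:Int) + 1) = (((k+1 : Nat)) : Int) := by push_cast; ring
    rw [e1, e2, PySem.List.pyGetD_natCast, PySem.List.pyGetD_natCast] at hcond
    rw [List.getD_eq_getElem _ _ (by omega), List.getD_eq_getElem _ _ (by omega),
        List.getD_eq_getElem _ _ (by omega)] at hcond
    simp only [Bool.and_eq_true, beq_iff_eq, Bool.not_eq_eq_eq_not, Bool.not_true,
      beq_eq_false_iff_ne, ne_eq] at hcond
    refine ⟨x[k], x[k+1], fun h => hcond.2 h, ⟨k, ?_, ?_, ?_⟩, ?_⟩
    · simp [List.getElem?_eq_getElem (by omega : k < x.length)]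
    · simp [List.getElem?_eq_getElem (by omega : k + 1 < x.length)]
    · simp [List.getElem?_eq_getElem hk3, hcond.1]
    · have e3 : ((k:Int) + 3) = ((k:Int) + ((3:Nat) : Int)) := by norm_num
      rw [hc0, e3, PySem.List.slice_natCast_add]
      rw [drop_triple x k hk3]
      simp only [List.take_succ_cons, List.take_zero]
      rw [hcond.1]
  · rintro ⟨a, b, hab, ⟨j, h1, h2, h3⟩, rfl⟩
    obtain ⟨hj1, e1⟩ := List.getElem?_eq_some_iff.mp h1
    obtain ⟨hj2, e2⟩ := List.getElem?_eq_some_iff.mp h2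
    obtain ⟨hj3, e3⟩ := List.getElem?_eq_some_iff.mp h3
    refine ⟨((j:Int), (x.take (x.length - 2))[j]'(by simp [List.length_take]; omega)),
      ⟨⟨j, by simp [List.length_take]; omega, by norm_num⟩, ?_⟩, ?_⟩
    · have ea : ((j:Int) + 2) = (((j+2 : Nat)) : Int) := by push_cast; ring
      have eb : ((j:Int) + 1) = (((j+1 : Nat)) : Int) := by push_cast; ring
      simp only [ea, eb, PySem.List.pyGetD_natCast]
      rw [List.getD_eq_getElem _ _ (by omega), List.getD_eq_getElem _ _ (by omega),
          List.getD_eq_getElem _ _ (by omega)]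
      simp [e1, e2, e3, hab]
    · have e3' : ((j:Int) + 3) = ((j:Int) + ((3:Nat) : Int)) := by norm_num
      rw [e3', PySem.List.slice_natCast_add]
      rw [drop_triple x j hj3]
      simp only [List.take_succ_cons, List.take_zero]
      rw [e1, e2, e3]

theorem mem_foldl_addif {T : Type} (cond : T → Bool) (g : T → Char × Char)
    (l : List T) (s : PySem.Set (Char × Char)) (y : Char × Char) :
    y ∈ l.foldl (fun t tr => if cond tr then t.add (g tr) else t) s ↔
      y ∈ s ∨ ∃ tr ∈ l, cond tr ∧ y = g tr := by
  induction l generalizing s with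
  | nil => simp
  | cons h tl ih =>
    simp only [List.foldl_cons, ih, List.mem_cons]
    split
    · rw [PySem.Set.mem_add]
      constructor
      · rintro (⟨h1 | h2⟩ | h3)
        · exact Or.inl h1
        · exact Or.inr ⟨h, Or.inl rfl, by assumption, h2⟩
        · exact Or.inr (by obtain ⟨tr, htr, hc, hy⟩ := h3; exact ⟨tr, Or.inr htr, hc, hy⟩)
      · rintro (h1 | ⟨tr, (rfl | htr), hc, hy⟩)
        · exact Or.inl (Or.inl h1)
        · exact Or.inl (Or.inr hy)
        · exact Or.inr ⟨tr, htr, hc, hy⟩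
    · constructor
      · rintro (h1 | h3)
        · exact Or.inl h1
        · exact Or.inr (by obtain ⟨tr, htr, hc, hy⟩ := h3; exact ⟨tr, Or.inr htr, hc, hy⟩)
      · rintro (h1 | ⟨tr, (rfl | htr), hc, hy⟩)
        · exact Or.inl h1
        · simp_all
        · exact Or.inr ⟨tr, htr, hc, hy⟩

theorem mem_addPairs (t : PySem.Set (Char × Char)) (seg : List Char) (y : Char × Char) :
    y ∈ addPairs t seg ↔ y ∈ t ∨ (y.1 ≠ y.2 ∧ HitIdx y.1 y.2 seg) := by
  unfold addPairs
  rw [mem_foldl_addif]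
  have hs1 : PySem.List.slice seg (some 1) none = seg.drop 1 := by
    rw [PySem.List.slice_from seg (by omega : (0:Int) ≤ 1)]; rfl
  have hs2 : PySem.List.slice seg (some 2) none = seg.drop 2 := by
    rw [PySem.List.slice_from seg (by omega : (0:Int) ≤ 2)]; rfl
  rw [hs1, hs2]
  apply or_congr Iff.rfl
  constructor
  · rintro ⟨⟨⟨a, b⟩, c⟩, htr, hc, rfl⟩
    obtain ⟨i, hi⟩ := List.mem_iff_getElem?.mp htr
    rw [List.getElem?_zip_eq_some] at hi
    obtain ⟨hab, hc2⟩ := hi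
    rw [List.getElem?_zip_eq_some] at hab
    simp only [List.getElem?_drop] at hab hc2
    simp only [Bool.and_eq_true, beq_iff_eq, Bool.not_eq_eq_eq_not, Bool.not_true,
      beq_eq_false_iff_ne, ne_eq] at hc
    refine ⟨hc.2, i, hab.1, by rw [show i + 1 = 1 + i by omega]; exact hab.2, ?_⟩
    rw [show i + 2 = 2 + i by omega, hc2, hc.1]
  · rintro ⟨hne, j, h1, h2, h3⟩
    refine ⟨((y.1, y.2), y.1), ?_, ?_, rfl⟩
    · rw [List.mem_iff_getElem?]
      exact ⟨j, by rw [List.getElem?_zip_eq_some, List.getElem?_zip_eq_some]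
                   simp only [List.getElem?_drop]
                   exact ⟨⟨h1, by rw [show 1 + j = j + 1 by omega]; exact h2⟩,
                          by rw [show 2 + j = j + 2 by omega]; exact h3⟩⟩
    · simp [hne]

theorem slice_even_eq {α : Type} (xs : List α) :
    (PySem.List.slice? xs none none 2).getD [] =
      (List.range ((xs.length + 1) / 2)).filterMap (fun k => xs[2 * k]?) := by
  simp only [PySem.List.slice?, PySem.List.sliceIndices]
  norm_num
  have h1 : (if (0:ℕ) < xs.length then (((xs.length:ℤ) + 2 - 1) / 2).toNat else (0:ℕ))
      = (xs.length + 1) / 2 := by split_ifs <;> omega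
  rw [h1]
  apply List.filterMap_congr
  intro k _
  congr 1

theorem slice_odd_eq {α : Type} (xs : List α) :
    (PySem.List.slice? xs (some 1) none 2).getD [] =
      (List.range (xs.length / 2)).filterMap (fun k => xs[2 * k + 1]?) := by
  simp only [PySem.List.slice?, PySem.List.sliceIndices]
  norm_num
  by_cases hn : xs.length ≤ 1
  · rw [if_neg (by omega), show xs.length / 2 = 0 from by omega]
    simp
  · rw [show min (1:ℤ) (xs.length:ℤ) = 1 from by omega, if_pos (by omega),
       show (((xs.length:ℤ) - 1 + 2 - 1) / 2).toNat = xs.length / 2 from by omega]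
    apply List.filterMap_congr
    intro k _
    congr 1
    omega

theorem mem_slice_even {α : Type} (xs : List α) (y : α) :
    y ∈ (PySem.List.slice? xs none none 2).getD [] ↔
      ∃ k : Nat, ∃ _ : k < xs.length, k % 2 = 0 ∧ xs[k] = y := by
  rw [slice_even_eq]
  simp only [List.mem_filterMap, List.mem_range]
  constructor
  · rintro ⟨k, hk, hget⟩
    obtain ⟨h, e⟩ := List.getElem?_eq_some_iff.mp hget
    exact ⟨2 * k, h, by omega, e⟩
  · rintro ⟨k, h, hpar, e⟩
    exact ⟨k / 2, by omega, by rw [show 2 * (k / 2) = k by omega]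
                               exact List.getElem?_eq_some_iff.mpr ⟨h, e⟩⟩

theorem mem_slice_odd {α : Type} (xs : List α) (y : α) :
    y ∈ (PySem.List.slice? xs (some 1) none 2).getD [] ↔
      ∃ k : Nat, ∃ _ : k < xs.length, k % 2 = 1 ∧ xs[k] = y := by
  rw [slice_odd_eq]
  simp only [List.mem_filterMap, List.mem_range]
  constructor
  · rintro ⟨k, hk, hget⟩
    obtain ⟨h, e⟩ := List.getElem?_eq_some_iff.mp hget
    exact ⟨2 * k + 1, h, by omega, e⟩
  · rintro ⟨k, h, hpar, e⟩
    exact ⟨k / 2, by omega, by rw [show 2 * (k / 2) + 1 = k by omega]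
                               exact List.getElem?_eq_some_iff.mpr ⟨h, e⟩⟩

theorem foldl_if_true {α : Type} (p : α → Bool) (l : List α) (b : Bool) :
    l.foldl (fun acc x => if p x then true else acc) b = (b || l.any p) := by
  induction l generalizing b with
  | nil => simp
  | cons h t ih => simp only [List.foldl_cons, List.any_cons, ih]
                   split <;> simp_all

theorem foldl_flat {α : Type} (g : α → List (List Char)) (l : List α) (acc : List (List Char)) :
    l.foldl (fun acc x => if g x ≠ [] then acc ++ g x else acc) acc
      = acc ++ l.flatMap g := by
  have h : (fun (acc : List (List Char)) x => if g x ≠ [] then acc ++ g x else acc)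
      = fun acc x => acc ++ g x := by
    funext acc x
    by_cases h : g x = [] <;> simp [h]
  rw [h, PySem.List.foldl_append_eq_flatMap]

theorem mod_two_nat (s : Nat) : (PySem.Int.mod (s:Int) 2 == 0) = (s % 2 == 0) := by
  have h : PySem.Int.mod (s:Int) 2 = ((s : Int) % 2) := by
    simp [PySem.Int.mod, Int.fmod_eq_emod]
  rw [h]
  rcases Nat.mod_two_eq_zero_or_one s with h2 | h2 <;>
    · have h3 : (s:Int) % 2 = (s % 2 : Nat) := by omega
      simp [h2, h3]

theorem coreA_iff (parts : List (List Char)) :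
    verifyACore parts = true ↔ SslProp parts := by
  unfold verifyACore
  simp only []
  rw [foldl_flat, foldl_if_true]
  simp only [List.nil_append, Bool.false_or, List.any_eq_true, List.mem_flatMap,
    mem_findAbas, mem_slice_even]
  constructor
  · rintro ⟨l, ⟨x, ⟨k, hk, hpar, hkx⟩, a, b, hab, hhit, rfl⟩, hp⟩
    have hbab : [PySem.List.pyGetD [a,b,a] (1:Int) ' ', PySem.List.pyGetD [a,b,a] (0:Int) ' ',
        PySem.List.pyGetD [a,b,a] (1:Int) ' '] = [b, a, b] := rfl
    rw [hbab] at hp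
    obtain ⟨_, hmem, hid⟩ := hp
    obtain ⟨y, hy, rfl⟩ := List.mem_map.mp hmem
    simp only [id_eq] at hid
    obtain ⟨m, hm, hmpar, hmy⟩ := (mem_slice_odd _ _).mp hy
    rw [PySem.Chars.isIn_iff_infix, infix_triple] at hid
    exact ⟨a, b, hab, ⟨k, hk, hpar, hkx ▸ hhit⟩, ⟨m, hm, hmpar, hmy ▸ hid⟩⟩
  · rintro ⟨a, b, hab, ⟨k, hk, hpar, hhit⟩, m, hm, hmpar, hodd⟩
    refine ⟨[a, b, a], ⟨parts[k], ⟨k, hk, hpar, rfl⟩, a, b, hab, hhit, rfl⟩, ?_⟩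
    have hbab : [PySem.List.pyGetD [a,b,a] (1:Int) ' ', PySem.List.pyGetD [a,b,a] (0:Int) ' ',
        PySem.List.pyGetD [a,b,a] (1:Int) ' '] = [b, a, b] := rfl
    rw [hbab]
    refine ⟨_, List.mem_map.mpr ⟨parts[m], (mem_slice_odd _ _).mpr ⟨m, hm, hmpar, rfl⟩, rfl⟩, ?_⟩
    simp only [id_eq]
    rw [PySem.Chars.isIn_iff_infix, infix_triple]
    exact hodd

theorem fold_inv (parts : List (List Char)) (s : Nat)
    (st : PySem.Set (Char × Char) × PySem.Set (Char × Char)) (y : Char × Char) :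
    (y ∈ ((PySem.List.enumerate parts (s:Int)).foldl
        (fun (st : PySem.Set (Char × Char) × PySem.Set (Char × Char)) p =>
          if PySem.Int.mod p.1 2 == 0 then (addPairs st.1 p.2, st.2) else (st.1, addPairs st.2 p.2))
        st).1 ↔
      y ∈ st.1 ∨ ∃ k, ∃ _ : k < parts.length, (s + k) % 2 = 0 ∧ y.1 ≠ y.2 ∧ HitIdx y.1 y.2 parts[k]) ∧
    (y ∈ ((PySem.List.enumerate parts (s:Int)).foldl
        (fun (st : PySem.Set (Char × Char) × PySem.Set (Char × Char)) p =>
          if PySem.Int.mod p.1 2 == 0 then (addPairs st.1 p.2, st.2) else (st.1, addPairs st.2 p.2))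
        st).2 ↔
      y ∈ st.2 ∨ ∃ k, ∃ _ : k < parts.length, (s + k) % 2 = 1 ∧ y.1 ≠ y.2 ∧ HitIdx y.1 y.2 parts[k]) := by
  induction parts generalizing s st with
  | nil => simp [PySem.List.enumerate]
  | cons x tl ih =>
    rw [PySem.List.enumerate_cons]
    simp only [List.foldl_cons, mod_two_nat]
    have hs1 : ((s:Int) + 1) = (((s+1 : Nat)) : Int) := by push_cast; ring
    rw [hs1]
    rcases Nat.mod_two_eq_zero_or_one s with hp | hp
    · rw [if_pos (by simp [hp])]
      obtain ⟨ih1, ih2⟩ := ih (s+1) (addPairs st.1 x, st.2)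
      constructor
      · rw [ih1, mem_addPairs]
        constructor
        · rintro ((h | h) | ⟨k, hk, hpar, hy⟩)
          · exact Or.inl h
          · exact Or.inr ⟨0, by simp, by omega, h⟩
          · exact Or.inr ⟨k+1, by simpa using hk, by omega, by simpa using hy⟩
        · rintro (h | ⟨k, hk, hpar, hy⟩)
          · exact Or.inl (Or.inl h)
          · cases k with
            | zero => exact Or.inl (Or.inr (by simpa using hy))
            | succ k => exact Or.inr ⟨k, by simpa using hk, by omega, by simpa using hy⟩
      · rw [ih2]
        constructor
        · rintro (h | ⟨k, hk, hpar, hy⟩)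
          · exact Or.inl h
          · exact Or.inr ⟨k+1, by simpa using hk, by omega, by simpa using hy⟩
        · rintro (h | ⟨k, hk, hpar, hy⟩)
          · exact Or.inl h
          · cases k with
            | zero => omega
            | succ k => exact Or.inr ⟨k, by simpa using hk, by omega, by simpa using hy⟩
    · rw [if_neg (by simp [hp])]
      obtain ⟨ih1, ih2⟩ := ih (s+1) (st.1, addPairs st.2 x)
      constructor
      · rw [ih1]
        constructor
        · rintro (h | ⟨k, hk, hpar, hy⟩)
          · exact Or.inl h
          · exact Or.inr ⟨k+1, by simpa using hk, by omega, by simpa using hy⟩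
        · rintro (h | ⟨k, hk, hpar, hy⟩)
          · exact Or.inl h
          · cases k with
            | zero => omega
            | succ k => exact Or.inr ⟨k, by simpa using hk, by omega, by simpa using hy⟩
      · rw [ih2, mem_addPairs]
        constructor
        · rintro ((h | h) | ⟨k, hk, hpar, hy⟩)
          · exact Or.inl h
          · exact Or.inr ⟨0, by simp, by omega, h⟩
          · exact Or.inr ⟨k+1, by simpa using hk, by omega, by simpa using hy⟩
        · rintro (h | ⟨k, hk, hpar, hy⟩)
          · exact Or.inl (Or.inl h)
          · cases k with
            | zero => exact Or.inl (Or.inr (by simpa using hy))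
            | succ k => exact Or.inr ⟨k, by simpa using hk, by omega, by simpa using hy⟩

theorem coreB_iff (parts : List (List Char)) :
    verifyBCore parts = true ↔ SslProp parts := by
  unfold verifyBCore
  simp only []
  simp only [List.any_eq_true]
  have h0 : ((0:Nat) : Int) = (0 : Int) := rfl
  constructor
  · rintro ⟨q, hq2, hq1⟩
    replace hq1 := List.contains_iff_mem.mp hq1
    have inv := fold_inv parts 0 (PySem.Set.empty, PySem.Set.empty)
    rw [← h0] at hq1 hq2
    have hmem2 := ((inv q).2).mp hq2
    have hmem1 := ((inv (q.2, q.1)).1).mp hq1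
    rcases hmem2 with h | ⟨k, hk, hkp, hne, hhit⟩
    · exact absurd h (by simp [PySem.Set.empty])
    rcases hmem1 with h | ⟨m, hm, hmp, _, hhit'⟩
    · exact absurd h (by simp [PySem.Set.empty])
    exact ⟨q.2, q.1, fun h => hne h.symm,
      ⟨m, hm, by omega, by simpa using hhit'⟩, ⟨k, hk, by omega, by simpa using hhit⟩⟩
  · rintro ⟨a, b, hab, ⟨k, hk, hkp, hhit⟩, m, hm, hmp, hhit'⟩
    refine ⟨(b, a), ?_, ?_⟩
    · have inv := fold_inv parts 0 (PySem.Set.empty, PySem.Set.empty) (b, a)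
      rw [h0] at inv
      exact inv.2.mpr (Or.inr ⟨m, hm, by omega, fun h => hab h.symm, hhit'⟩)
    · apply List.contains_iff_mem.mpr
      have inv := fold_inv parts 0 (PySem.Set.empty, PySem.Set.empty) (a, b)
      rw [h0] at inv
      exact inv.1.mpr (Or.inr ⟨k, hk, by omega, hab, hhit⟩)

-- ===== VERDICT (by name: the statement is the Claim_ definition above) =====
theorem verify_ip_spec : Claim_equal_verify_ip := by
  intro instr _
  show verify_ip instr = verify_ip_alt instr
  unfold verify_ip verify_ip_alt
  rw [Bool.eq_iff_iff, coreA_iff, coreB_iff]
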